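-- pv_equiv track=rewrite | github.com/benreynwar/zamlet | python/riscv_model/ew_convert.py | uint_to_list_of_uints
-- ===== SOURCE A (Python) =====
-- def uint_to_list_of_uints(value: int, width: int, length: int):
--     reduced = value
--     ints = []
--     f = 1 << width
--     for index in range(length):
--         ints.append(reduced % f)
--         reduced = reduced >> width
--     assert reduced == 0
--     return ints
-- ===== SOURCE B (Python) =====
-- def uint_to_list_of_uints(value: int, width: int, length: int):
--     mask = (1 << width) - 1
--     assert value >> (length * width) == 0
--     return [(value >> (index * width)) & mask for index in range(length)]
-- ===== Notes on version B (the rewrite author's own statement) =====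
-- stated objective: simpler
-- what changed: Replaced the accumulator-threaded loop (repeated mod/shift of a running 'reduced') by an independent per-index shift-and-mask formula (value >> (i*width)) & mask, with the overflow assert stated directly on value instead of on leftover loop state.
-- outside the precondition, e.g. on uint_to_list_of_uints(0, 4, -1): A returns [], B raises ValueError
import Mathlib
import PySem

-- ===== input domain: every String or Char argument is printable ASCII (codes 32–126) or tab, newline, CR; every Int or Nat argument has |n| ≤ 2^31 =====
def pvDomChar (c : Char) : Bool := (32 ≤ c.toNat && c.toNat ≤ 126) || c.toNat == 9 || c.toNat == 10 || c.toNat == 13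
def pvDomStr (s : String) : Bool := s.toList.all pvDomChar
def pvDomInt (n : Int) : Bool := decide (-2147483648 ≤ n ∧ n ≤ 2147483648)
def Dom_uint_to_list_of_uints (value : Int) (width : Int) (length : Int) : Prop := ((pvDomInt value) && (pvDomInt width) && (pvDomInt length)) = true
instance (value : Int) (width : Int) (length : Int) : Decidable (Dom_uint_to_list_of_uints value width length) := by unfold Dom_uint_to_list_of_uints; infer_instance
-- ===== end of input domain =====

-- ===== PORT A =====
-- Port of A: loop threading the accumulator `reduced`, appending `reduced % (1 << width)`
-- and shifting each iteration.  (A mutates nothing; the `assert reduced == 0` raise is Pre_'s.)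
def uint_to_list_of_uints (value : Int) (width : Int) (length : Int) : List Int :=
  let f : Int := 1 <<< width.toNat
  ((PySem.List.pyRange 0 length 1).foldl
    (fun (st : Int × List Int) _ =>
      (st.1 >>> width.toNat, st.2 ++ [PySem.Int.mod st.1 f]))
    (value, [])).2

-- ===== PORT B =====
-- B: each digit computed independently as (value >> (i*width)) & mask — no threaded state.
def uint_to_list_of_uints_alt (value : Int) (width : Int) (length : Int) : List Int :=
  let mask : Int := (1 <<< width.toNat) - 1
  (PySem.List.pyRange 0 length 1).map
    (fun index => PySem.Int.band (value >>> (index * width).toNat) mask)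

-- ===== PRECONDITION & SPEC =====
-- Exactly where Python A returns normally: width >= 0 (else `1 << width` raises ValueError),
-- 0 <= value < 2^(width*length), stated via bitLength (else `assert reduced == 0` raises),
-- and length >= 0.  The one family Pre_ excludes on which A still RETURNS is value = 0 with
-- length < 0 (A returns []); there B itself raises ValueError on the negative shift (cited).
def Pre_uint_to_list_of_uints (value : Int) (width : Int) (length : Int) : Prop :=
  0 ≤ width ∧ 0 ≤ length ∧ 0 ≤ value ∧ PySem.Int.bitLength value ≤ width.toNat * length.toNat
instance (value : Int) (width : Int) (length : Int) : Decidable (Pre_uint_to_list_of_uints value width length) := by unfold Pre_uint_to_list_of_uints; infer_instance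
def pvWitness_uint_to_list_of_uints : Int × Int × Int := (5, 2, 3)

def Spec_uint_to_list_of_uints (value : Int) (width : Int) (length : Int) (out : List Int) : Prop := out = uint_to_list_of_uints_alt value width length
instance (value : Int) (width : Int) (length : Int) (out : List Int) : Decidable (Spec_uint_to_list_of_uints value width length out) := by unfold Spec_uint_to_list_of_uints; infer_instance

-- ===== CLAIM (what is proved, stated in full; the proofs are below) =====
def Claim_equal_uint_to_list_of_uints : Prop := ∀ (value : Int) (width : Int) (length : Int), Dom_uint_to_list_of_uints value width length → Pre_uint_to_list_of_uints value width length → Spec_uint_to_list_of_uints value width length (uint_to_list_of_uints value width length)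

-- ===== LEMMAS AND PROOFS =====

-- Casting shifts between Nat and Int.
lemma pvCastShiftRight (m k : Nat) : ((m : Int) >>> k) = ((m >>> k : Nat) : Int) := rfl

-- A's fold, on a nonnegative value, produces exactly the list of base-2^w digits.
lemma pvFoldA (w : Nat) (n : Nat) (V : Nat) (acc : List Int) :
    ((List.range n).foldl
      (fun (st : Int × List Int) (_ : Nat) =>
        (st.1 >>> w, st.2 ++ [PySem.Int.mod st.1 ((2 ^ w : Nat) : Int)]))
      ((V : Int), acc))
    = (((V >>> (n * w) : Nat) : Int),
       acc ++ (List.range n).map (fun i => (((V >>> (i * w)) % 2 ^ w : Nat) : Int))) := by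
  induction n generalizing acc with
  | zero => simp
  | succ n ih =>
    rw [List.range_succ, List.foldl_append, ih, List.foldl_cons, List.foldl_nil]
    refine Prod.ext ?_ ?_
    · show ((V >>> (n * w) : Nat) : Int) >>> w = _
      rw [pvCastShiftRight, ← Nat.shiftRight_add]
      norm_num [Nat.succ_mul]
    · simp

-- A's port on casts of naturals equals the digit list.
lemma pvPortA (w n V : Nat) :
    uint_to_list_of_uints (V : Int) (w : Int) (n : Int)
    = (List.range n).map (fun i => (((V >>> (i * w)) % 2 ^ w : Nat) : Int)) := by
  unfold uint_to_list_of_uints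
  rw [PySem.List.pyRange_one]
  simp only [Int.toNat_natCast, sub_zero, List.foldl_map, Nat.one_shiftLeft]
  rw [pvFoldA]
  simp

-- B's port on casts of naturals equals the same digit list.
lemma pvPortB (w n V : Nat) :
    uint_to_list_of_uints_alt (V : Int) (w : Int) (n : Int)
    = (List.range n).map (fun i => (((V >>> (i * w)) % 2 ^ w : Nat) : Int)) := by
  unfold uint_to_list_of_uints_alt
  rw [PySem.List.pyRange_one]
  simp only [Int.toNat_natCast, sub_zero, List.map_map]
  refine List.map_congr_left (fun k _ => ?_)
  have hmul : (((0 : Int) + (k : Int)) * (w : Int)).toNat = k * w := by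
    rw [zero_add, ← Nat.cast_mul, Int.toNat_natCast]
  have hmask : (((1 <<< w : Nat)) : Int) - 1 = (((2 ^ w - 1 : Nat)) : Int) := by
    rw [Nat.one_shiftLeft, Nat.cast_sub Nat.one_le_two_pow, Nat.cast_one]
  simp only [Function.comp, hmul, pvCastShiftRight]
  rw [hmask, PySem.Int.band_natCast, Nat.and_two_pow_sub_one_eq_mod]

-- ===== VERDICT (by name: the statement is the Claim_ definition above) =====
theorem uint_to_list_of_uints_spec : Claim_equal_uint_to_list_of_uints := by
  intro value width length _ hpre
  obtain ⟨hw, hl, hv, _⟩ := hpre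
  unfold Spec_uint_to_list_of_uints
  rw [← Int.toNat_of_nonneg hv, ← Int.toNat_of_nonneg hw, ← Int.toNat_of_nonneg hl,
    pvPortA, pvPortB]
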